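-- pv_equiv track=rewrite | github.com/raknoz/FIUBA-algorithms_1 | module_6/ex_6_8_6.py | cambiar_vocales
-- ===== SOURCE A (Python) =====
-- LETRAS_VOCALES = ['a', 'e', 'i', 'o', 'u']
--
-- def siguiente_vocal(v):
--     '''
--         Función que devuelve la siguiente vocal.
--     '''
--     if v.lower() == 'u':
--         return 'a'
--     #Obtengo la posición en la lista y retorno la sigueente
--     return LETRAS_VOCALES[LETRAS_VOCALES.index(v) + 1]
--
-- def cambiar_vocales(s):
--     '''
--         Función que recorre una lista y cuando encuentra una vocal la cambia por la siguiente.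
--     '''
--     result = ''
--
--     for c in s.lower():
--         if c in LETRAS_VOCALES:
--             result += siguiente_vocal(c)
--         else:
--             result += c
--
--     return result
-- ===== SOURCE B (Python) =====
-- def cambiar_vocales(s):
--     # Staged whole-string passes: lowercase once, then rotate the vowel cycle with
--     # five replace passes using UPPERCASE letters as already-processed markers
--     # (the lowered string contains no uppercase, so markers can never collide),
--     # and finally lowercase the markers back.
--     s = s.lower()
--     for old, new in (('a', 'E'), ('e', 'I'), ('i', 'O'), ('o', 'U'), ('u', 'A')):
--         s = s.replace(old, new)
--     return s.lower()
-- ===== Notes on version B (the rewrite author's own statement) =====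
-- stated objective: alternative
-- what changed: Replaces the per-character loop with in/index branching by staged whole-string replace passes that rotate the vowel cycle through uppercase sentinel markers (safe because the string is lowercased first), followed by a final lowercase pass.
import Mathlib
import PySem

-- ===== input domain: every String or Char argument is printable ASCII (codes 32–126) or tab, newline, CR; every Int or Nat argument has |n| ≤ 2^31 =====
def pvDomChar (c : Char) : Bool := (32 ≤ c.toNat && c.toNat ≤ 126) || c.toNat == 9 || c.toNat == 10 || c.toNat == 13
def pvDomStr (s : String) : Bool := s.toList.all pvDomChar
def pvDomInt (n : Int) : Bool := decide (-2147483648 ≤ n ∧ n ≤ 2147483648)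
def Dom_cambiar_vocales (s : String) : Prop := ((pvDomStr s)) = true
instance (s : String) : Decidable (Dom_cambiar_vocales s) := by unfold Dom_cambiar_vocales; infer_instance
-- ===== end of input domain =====

-- B replaces the per-character loop by staged whole-string replace passes rotating the
-- vowel cycle through uppercase sentinel markers, then a final lowercase pass (alternative).

-- ===== PORT A =====
def LETRAS_VOCALES : List Char := ['a', 'e', 'i', 'o', 'u']

-- Python raises ValueError/IndexError on the `none` branches; they are unreachable
-- because siguiente_vocal is only called on lowercase vowels, so `.getD v` is a dead default.
def siguiente_vocal (v : Char) : Char :=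
  if PySem.Chars.lowerChar v == 'u' then 'a'
  else
    match PySem.List.index? LETRAS_VOCALES v with
    | some k => (PySem.List.pyGet? LETRAS_VOCALES ((k : Int) + 1)).getD v
    | none => v

def cambiar_vocales (s : String) : String :=
  String.ofList ((PySem.Str.lower s).toList.foldl
    (fun result c =>
      result ++ (if LETRAS_VOCALES.contains c then [siguiente_vocal c] else [c])) [])

-- ===== PORT B =====
-- the five staged replace passes, in Source B's order
def pvPasses : List (String × String) := [("a", "E"), ("e", "I"), ("i", "O"), ("o", "U"), ("u", "A")]

def cambiar_vocales_alt (s : String) : String :=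
  PySem.Str.lower
    (pvPasses.foldl (fun t p => PySem.Str.replace t p.1 p.2) (PySem.Str.lower s))

-- ===== PRECONDITION & SPEC =====
def Spec_cambiar_vocales (s : String) (out : String) : Prop := out = cambiar_vocales_alt s
instance (s : String) (out : String) : Decidable (Spec_cambiar_vocales s out) := by unfold Spec_cambiar_vocales; infer_instance

-- ===== CLAIM (what is proved, stated in full; the proofs are below) =====
def Claim_equal_cambiar_vocales : Prop := ∀ (s : String), Dom_cambiar_vocales s → Spec_cambiar_vocales s (cambiar_vocales s)

-- ===== LEMMAS AND PROOFS =====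

-- single-character str.replace is a character map
theorem go_single (a b : Char) : ∀ (l : List Char) (fuel : Nat) (acc : List Char), l.length ≤ fuel →
    PySem.Chars.replace.go [a] [b] fuel l acc
      = acc.reverse ++ l.map (fun c => if c == a then b else c)
  | [], 0, acc, _ => by simp [PySem.Chars.replace.go]
  | [], fuel+1, acc, _ => by simp [PySem.Chars.replace.go]
  | c :: t, fuel+1, acc, h => by
    rw [PySem.Chars.replace.go]
    by_cases hc : c = a
    · rw [if_pos (by simp [List.isPrefixOf, hc])]
      simp only [List.length_cons, List.length_nil, List.drop_succ_cons, List.drop_zero]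
      rw [go_single a b t fuel _ (by simpa using h)]
      simp [hc]
    · rw [if_neg (by simp [List.isPrefixOf, Ne.symm hc])]
      rw [go_single a b t fuel _ (by simpa using h)]
      simp [hc]

theorem replace_single (l : List Char) (a b : Char) :
    PySem.Chars.replace l [a] [b] = l.map (fun c => if c == a then b else c) := by
  unfold PySem.Chars.replace
  rw [if_neg (by simp)]
  simpa using go_single a b l l.length [] le_rfl

theorem isupper_iff (c : Char) : PySem.Chars.isupper c = true ↔ 65 ≤ c.toNat ∧ c.toNat ≤ 90 := by
  simp only [PySem.Chars.isupper, Bool.and_eq_true, decide_eq_true_eq, Char.le_def, Char.toNat]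
  constructor
  · rintro ⟨h1, h2⟩; exact ⟨by exact_mod_cast h1, by exact_mod_cast h2⟩
  · rintro ⟨h1, h2⟩; exact ⟨by exact_mod_cast h1, by exact_mod_cast h2⟩

theorem toNat_ofNat_small (n : Nat) (h : n < 200) : (Char.ofNat n).toNat = n := by
  unfold Char.ofNat
  rw [dif_pos (by omega)]
  rfl

theorem isupper_lowerChar (x : Char) : PySem.Chars.isupper (PySem.Chars.lowerChar x) = false := by
  unfold PySem.Chars.lowerChar
  split
  · next h =>
    rw [isupper_iff x] at h
    rw [Bool.eq_false_iff]
    intro hc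
    rw [isupper_iff] at hc
    rw [toNat_ofNat_small _ (by omega)] at hc
    omega
  · next h => simpa using h

theorem lowerChar_idem (x : Char) : PySem.Chars.lowerChar (PySem.Chars.lowerChar x) = PySem.Chars.lowerChar x := by
  conv_lhs => rw [PySem.Chars.lowerChar]
  rw [isupper_lowerChar]
  simp

-- A's per-character action, in map form
theorem foldl_map_A (l : List Char) (acc : List Char) :
    l.foldl (fun result c =>
        result ++ (if LETRAS_VOCALES.contains c then [siguiente_vocal c] else [c])) acc
      = acc ++ l.map (fun c => if LETRAS_VOCALES.contains c then siguiente_vocal c else c) := by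
  induction l generalizing acc with
  | nil => simp
  | cons x xs ih =>
    rw [List.foldl_cons, ih]
    by_cases h : x ∈ LETRAS_VOCALES <;> simp [h]

-- pointwise agreement of B's composed passes with A's vowel shift, on lowered characters
theorem pointwise (x : Char) :
    PySem.Chars.lowerChar
        ((fun c => if c == 'u' then 'A' else c)
          ((fun c => if c == 'o' then 'U' else c)
            ((fun c => if c == 'i' then 'O' else c)
              ((fun c => if c == 'e' then 'I' else c)
                ((fun c => if c == 'a' then 'E' else c) (PySem.Chars.lowerChar x))))))
      = (if LETRAS_VOCALES.contains (PySem.Chars.lowerChar x) then siguiente_vocal (PySem.Chars.lowerChar x)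
         else PySem.Chars.lowerChar x) := by
  have hid := lowerChar_idem x
  set c := PySem.Chars.lowerChar x with hc
  by_cases h1 : c = 'a'; · rw [h1]; decide
  by_cases h2 : c = 'e'; · rw [h2]; decide
  by_cases h3 : c = 'i'; · rw [h3]; decide
  by_cases h4 : c = 'o'; · rw [h4]; decide
  by_cases h5 : c = 'u'; · rw [h5]; decide
  have e1 : (c == 'a') = false := by simp [h1]
  have e2 : (c == 'e') = false := by simp [h2]
  have e3 : (c == 'i') = false := by simp [h3]
  have e4 : (c == 'o') = false := by simp [h4]
  have e5 : (c == 'u') = false := by simp [h5]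
  have hct : LETRAS_VOCALES.contains c = false := by
    simp [LETRAS_VOCALES, h1, h2, h3, h4, h5]
  simp only [e1, e2, e3, e4, e5, Bool.false_eq_true, if_false, hct, hid]

-- ===== VERDICT (by name: the statement is the Claim_ definition above) =====
theorem cambiar_vocales_spec : Claim_equal_cambiar_vocales := by
  intro s _
  unfold Spec_cambiar_vocales cambiar_vocales cambiar_vocales_alt
  rw [foldl_map_A]
  simp only [pvPasses, List.foldl_cons, List.foldl_nil]
  conv_rhs => rw [PySem.Str.lower]
  apply congrArg String.ofList
  simp only [PySem.Str.toList_replace, PySem.Str.toList_lower]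
  have ha : ("a" : String).toList = ['a'] := by decide
  have hE : ("E" : String).toList = ['E'] := by decide
  have he : ("e" : String).toList = ['e'] := by decide
  have hI : ("I" : String).toList = ['I'] := by decide
  have hi : ("i" : String).toList = ['i'] := by decide
  have hO : ("O" : String).toList = ['O'] := by decide
  have ho : ("o" : String).toList = ['o'] := by decide
  have hU : ("U" : String).toList = ['U'] := by decide
  have hu : ("u" : String).toList = ['u'] := by decide
  have hA : ("A" : String).toList = ['A'] := by decide
  rw [ha, hE, he, hI, hi, hO, ho, hU, hu, hA]
  simp only [replace_single, PySem.Chars.lower, List.map_map, List.nil_append]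
  apply List.map_congr_left
  intro x _
  simp only [Function.comp_apply]
  exact (pointwise x).symm
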